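-- pv_equiv track=rewrite | github.com/katsanyi/aoc2023 | aoc13.py | get_axes_sl
-- ===== SOURCE A (Python) =====
-- def is_symmetric(s,p):
--     if p <= 0 or p >= len(s):
--         return False
--     l = min(p, len(s) - p)
--     for i in range(l):
--         if s[p-i-1] != s[p+i]:
--             return False
--     return True
--
-- def get_axes_sl(s, l):
--     if len(s) <= 1:
--         return []
--     ret = []
--     for i in l:
--         if is_symmetric(s,i):
--             ret.append(i)
--     return ret
-- ===== SOURCE B (Python) =====
-- def get_axes_sl(s, l):
--     # Precompute the set of all valid reflection axes once, each checked by an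
--     # outward two-pointer walk, then filter the candidate list by set membership.
--     n = len(s)
--     if n <= 1:
--         return []
--     valid = set()
--     for p in range(1, n):
--         a, b = p - 1, p
--         while a >= 0 and b < n and s[a] == s[b]:
--             a -= 1
--             b += 1
--         if a < 0 or b >= n:
--             valid.add(p)
--     return [i for i in l if i in valid]
-- ===== Notes on version B (the rewrite author's own statement) =====
-- stated objective: alternative
-- what changed: B precomputes the set of all valid axes once, checking each boundary with an outward two-pointer walk to the string's edge, then filters the candidate list by O(1) set membership, instead of A's character-by-character indexed scan per candidate.
import Mathlib
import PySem

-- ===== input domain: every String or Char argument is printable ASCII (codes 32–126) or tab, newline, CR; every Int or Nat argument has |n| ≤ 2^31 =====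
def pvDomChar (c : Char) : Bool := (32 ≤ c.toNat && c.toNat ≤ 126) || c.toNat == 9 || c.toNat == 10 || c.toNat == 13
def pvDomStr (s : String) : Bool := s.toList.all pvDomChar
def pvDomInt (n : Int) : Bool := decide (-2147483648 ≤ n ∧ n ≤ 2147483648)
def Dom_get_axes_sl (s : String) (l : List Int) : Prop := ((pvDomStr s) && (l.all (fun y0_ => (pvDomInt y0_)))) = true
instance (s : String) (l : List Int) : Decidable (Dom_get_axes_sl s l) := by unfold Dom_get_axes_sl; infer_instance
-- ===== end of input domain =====

-- B precomputes the set of all valid axes once (outward two-pointer walk per boundary) and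
-- filters the candidate list by set membership; alternative structure, not measured faster.

-- ===== PORT A =====
-- for i in range(l): if s[p-i-1] != s[p+i]: return False  (indices are always in range
-- under the guard, so the Option comparison below is exact)
def symLoop (cs : List Char) (p : Int) : List Int → Bool
  | [] => true
  | i :: rest =>
    if PySem.List.pyGet? cs (p - i - 1) ≠ PySem.List.pyGet? cs (p + i) then false
    else symLoop cs p rest

def is_symmetric (s : String) (p : Int) : Bool :=
  let cs := s.toList
  if p ≤ 0 ∨ p ≥ (cs.length : Int) then false
  else
    let m : Int := min p ((cs.length : Int) - p)
    symLoop cs p (PySem.List.pyRange 0 m 1)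

def get_axes_sl (s : String) (l : List Int) : List Int :=
  if (s.toList.length : Int) ≤ 1 then []
  else l.foldl (fun ret i => if is_symmetric s i then ret ++ [i] else ret) []

-- ===== PORT B =====
-- while a >= 0 and b < n and s[a] == s[b]: a -= 1; b += 1   (the walk never reads out of
-- range under its own guard, so the Option comparison is exact)
def reflectWalk (cs : List Char) (a b : Int) : Int × Int :=
  if h : 0 ≤ a ∧ b < (cs.length : Int) ∧ PySem.List.pyGet? cs a = PySem.List.pyGet? cs b then
    reflectWalk cs (a - 1) (b + 1)
  else (a, b)
termination_by ((cs.length : Int) - b).toNat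
decreasing_by obtain ⟨-, h2, -⟩ := h; omega

def axisOK (cs : List Char) (n p : Int) : Bool :=
  let ab := reflectWalk cs (p - 1) p
  decide (ab.1 < 0 ∨ ab.2 ≥ n)

def get_axes_sl_alt (s : String) (l : List Int) : List Int :=
  let cs := s.toList
  let n : Int := cs.length
  if n ≤ 1 then []
  else
    let valid : PySem.Set Int :=
      PySem.Set.ofList ((PySem.List.pyRange 1 n 1).filter (axisOK cs n))
    l.filter (fun i => PySem.Set.contains valid i)

-- ===== PRECONDITION & SPEC =====
def Spec_get_axes_sl (s : String) (l : List Int) (out : List Int) : Prop := out = get_axes_sl_alt s l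
instance (s : String) (l : List Int) (out : List Int) : Decidable (Spec_get_axes_sl s l out) := by unfold Spec_get_axes_sl; infer_instance

-- ===== CLAIM (what is proved, stated in full; the proofs are below) =====
def Claim_equal_get_axes_sl : Prop := ∀ (s : String) (l : List Int), Dom_get_axes_sl s l → Spec_get_axes_sl s l (get_axes_sl s l)

-- ===== LEMMAS AND PROOFS =====

-- the early-return loop is the conjunction over the index list
theorem symLoop_eq_all (cs : List Char) (p : Int) (rng : List Int) :
    symLoop cs p rng
      = rng.all (fun i => PySem.List.pyGet? cs (p - i - 1) == PySem.List.pyGet? cs (p + i)) := by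
  induction rng with
  | nil => rfl
  | cons i rest ih =>
      simp only [symLoop, List.all_cons, ih]
      by_cases h : PySem.List.pyGet? cs (p - i - 1) = PySem.List.pyGet? cs (p + i) <;>
        simp [h]

-- the two-pointer walk started t steps out reaches an edge iff all remaining pairs match
theorem reflectWalk_edge_iff (cs : List Char) (p m : Int) (k : Nat)
    (hm : m = min p ((cs.length : Int) - p)) :
    ∀ t : Int, 0 ≤ t → t ≤ m → (m - t).toNat = k →
      (((reflectWalk cs (p - t - 1) (p + t)).1 < 0 ∨
        (reflectWalk cs (p - t - 1) (p + t)).2 ≥ (cs.length : Int))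
        ↔ ∀ j : Int, t ≤ j → j < m →
            PySem.List.pyGet? cs (p - j - 1) = PySem.List.pyGet? cs (p + j)) := by
  induction k with
  | zero =>
    intro t ht0 htm hk
    have htm' : t = m := by omega
    subst htm'
    have hedge : p - t - 1 < 0 ∨ (cs.length : Int) ≤ p + t := by omega
    rw [reflectWalk, dif_neg (by rintro ⟨h1, h2, -⟩; omega)]
    exact iff_of_true (by simpa using (by omega)) (fun j hj1 hj2 => by omega)
  | succ k ih =>
    intro t ht0 htm hk
    have htm' : t < m := by omega
    by_cases hc : PySem.List.pyGet? cs (p - t - 1) = PySem.List.pyGet? cs (p + t)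
    · rw [reflectWalk, dif_pos ⟨by omega, by omega, hc⟩,
        show p - t - 1 - 1 = p - (t + 1) - 1 from by ring,
        show p + t + 1 = p + (t + 1) from by ring,
        ih (t + 1) (by omega) (by omega) (by omega)]
      constructor
      · intro h j hj1 hj2
        rcases eq_or_lt_of_le hj1 with rfl | hj1'
        · exact hc
        · exact h j (by omega) hj2
      · intro h j hj1 hj2
        exact h j (by omega) hj2
    · rw [reflectWalk, dif_neg (by rintro ⟨-, -, hq⟩; exact hc hq)]
      exact iff_of_false (by simpa using (by omega : ¬(p - t - 1 < 0 ∨ (cs.length : Int) ≤ p + t)))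
        (fun h => hc (h t le_rfl (by omega)))

-- pointwise: A's per-candidate scan agrees with B's precomputed-table membership
theorem is_symmetric_eq_contains (s : String) (i : Int) :
    is_symmetric s i
      = PySem.Set.contains
          (PySem.Set.ofList
            ((PySem.List.pyRange 1 (s.toList.length : Int) 1).filter
              (axisOK s.toList (s.toList.length : Int)))) i := by
  set cs := s.toList with hcs
  rw [Bool.eq_iff_iff]
  have hcont : PySem.Set.contains
        (PySem.Set.ofList
          ((PySem.List.pyRange 1 (cs.length : Int) 1).filter (axisOK cs (cs.length : Int)))) i
        = true
      ↔ (1 ≤ i ∧ i < (cs.length : Int)) ∧ axisOK cs (cs.length : Int) i = true := by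
    unfold PySem.Set.contains
    rw [List.contains_iff_mem, PySem.Set.mem_ofList, List.mem_filter,
      PySem.List.mem_pyRange_one]
  rw [hcont]
  show (is_symmetric s i = true) ↔ _
  unfold is_symmetric
  rw [← hcs]
  by_cases hg : i ≤ 0 ∨ i ≥ (cs.length : Int)
  · rw [if_pos hg]
    simp only [Bool.false_eq_true, false_iff]
    rintro ⟨⟨h1, h2⟩, -⟩
    omega
  · rw [if_neg hg]
    push Not at hg
    obtain ⟨h0, hn⟩ := hg
    rw [symLoop_eq_all, List.all_eq_true]
    have hw := reflectWalk_edge_iff cs i (min i ((cs.length : Int) - i))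
      (min i ((cs.length : Int) - i)).toNat rfl 0 le_rfl (by omega) (by omega)
    rw [show i - 0 - 1 = i - 1 from by ring, show i + 0 = i from by ring] at hw
    simp only [axisOK, decide_eq_true_iff]
    rw [hw]
    constructor
    · intro h
      refine ⟨⟨by omega, hn⟩, ?_⟩
      intro j hj0 hjm
      have hjmem : j ∈ PySem.List.pyRange 0 (min i ((cs.length : Int) - i)) 1 := by
        rw [PySem.List.mem_pyRange_one]; omega
      have := h _ hjmem
      rwa [beq_iff_eq] at this
    · rintro ⟨-, h⟩
      intro j hjmem
      rw [PySem.List.mem_pyRange_one] at hjmem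
      rw [beq_iff_eq]
      exact h j (by omega) (by omega)

theorem get_axes_sl_spec : Claim_equal_get_axes_sl := by
  intro s l _
  simp only [Spec_get_axes_sl, get_axes_sl, get_axes_sl_alt]
  by_cases h : (s.toList.length : Int) ≤ 1
  · rw [if_pos h, if_pos h]
  · rw [if_neg h, if_neg h, PySem.List.foldl_append_if_eq_filter (is_symmetric s) l [],
      List.nil_append]
    exact List.filter_congr (fun i _ => is_symmetric_eq_contains s i)
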